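-- pv_equiv track=rewrite | github.com/wzygxr/shuati | class013_CircularDequeAndMonotonicQueue/CircularDeque.py | colorTheBall
-- ===== SOURCE A (Python) =====
-- from collections import deque as collections_deque
-- from typing import List, Tuple
--
-- def colorTheBall(balloons: List[int]) -> int:
--     """
--     HDU 1199 Color the Ball
--     题目描述：有n个气球，每个气球的颜色可以是1到n中的一种，每次操作可以将某个区间内的所有气球染成同一种颜色。
--     求最少需要多少次操作才能将所有气球染成同一种颜色。
--     解题思路：使用双端队列维护连续的相同颜色区间，时间复杂度O(n)
--     """
--     if not balloons:
--         return 0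
--
--     dq = collections_deque()
--
--     for color in balloons:
--         # 移除队列尾部与当前颜色相同的元素
--         while dq and dq[-1] == color:
--             dq.pop()
--         dq.append(color)
--
--     # 每一段连续不同的颜色需要一次操作
--     return len(dq)
-- ===== SOURCE B (Python) =====
-- from typing import List
--
-- def colorTheBall(balloons: List[int]) -> int:
--     if not balloons:
--         return 0
--     count = 1
--     prev = balloons[0]
--     for color in balloons[1:]:
--         if color != prev:
--             count += 1
--             prev = color
--     return count
-- ===== Notes on version B (the rewrite author's own statement) =====
-- stated objective: simpler
-- what changed: Replaces the deque with its pop-while-equal inner loop by a single pass keeping only a scalar run counter and the previous color.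
import Mathlib
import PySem

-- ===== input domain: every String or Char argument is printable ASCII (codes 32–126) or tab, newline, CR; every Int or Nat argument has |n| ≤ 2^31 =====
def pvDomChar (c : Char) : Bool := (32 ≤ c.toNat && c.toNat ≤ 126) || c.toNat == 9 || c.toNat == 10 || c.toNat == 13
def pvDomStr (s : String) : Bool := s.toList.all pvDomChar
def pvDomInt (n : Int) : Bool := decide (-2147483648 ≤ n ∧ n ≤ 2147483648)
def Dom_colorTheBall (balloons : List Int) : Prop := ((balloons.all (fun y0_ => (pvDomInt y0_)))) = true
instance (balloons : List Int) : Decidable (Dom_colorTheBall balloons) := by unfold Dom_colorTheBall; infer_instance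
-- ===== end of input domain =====

-- B replaces A's deque (with its inner pop-while-equal loop) by a single pass with a scalar
-- run counter and the previous color; objective: simpler.

-- ===== PORT A =====
-- The deque is represented with its RIGHT end (append/pop side) at the list head, so
-- dq.append / dq.pop / dq[-1] are cons / tail / head; len is invariant under reversal.
-- the inner 'while dq and dq[-1] == color: dq.pop()' loop
def pvPopWhile (color : Int) : List Int → List Int
  | [] => []
  | x :: rest => if x = color then pvPopWhile color rest else x :: rest

def colorTheBall (balloons : List Int) : Int :=
  if balloons = [] then 0
  else ((balloons.foldl (fun dq color => color :: pvPopWhile color dq) []).length : Int)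

-- ===== PORT B =====
def pvRunCount (prev : Int) (count : Int) : List Int → Int
  | [] => count
  | color :: rest =>
      if color ≠ prev then pvRunCount color (count + 1) rest
      else pvRunCount prev count rest

def colorTheBall_alt (balloons : List Int) : Int :=
  match balloons with
  | [] => 0
  | h :: t => pvRunCount h 1 t

-- ===== PRECONDITION & SPEC =====
def Spec_colorTheBall (balloons : List Int) (out : Int) : Prop := out = colorTheBall_alt balloons
instance (balloons : List Int) (out : Int) : Decidable (Spec_colorTheBall balloons out) := by unfold Spec_colorTheBall; infer_instance

-- ===== CLAIM (what is proved, stated in full; the proofs are below) =====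
def Claim_equal_colorTheBall : Prop := ∀ (balloons : List Int), Dom_colorTheBall balloons → Spec_colorTheBall balloons (colorTheBall balloons)

-- ===== LEMMAS AND PROOFS =====

-- no two adjacent elements equal
def pvNoAdj : List Int → Prop
  | [] => True
  | [_] => True
  | a :: b :: t => a ≠ b ∧ pvNoAdj (b :: t)

-- Invariant: the deque is nonempty, its top equals the last processed color, and it has
-- no adjacent equal elements; then its length tracks B's run counter.
lemma pv_key (t : List Int) : ∀ (r : List Int) (p : Int),
    pvNoAdj (p :: r) →
    ((t.foldl (fun dq color => color :: pvPopWhile color dq) (p :: r)).length : Int)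
      = pvRunCount p ((p :: r).length : Int) t := by
  induction t with
  | nil => intro r p _; simp [pvRunCount]
  | cons c t ih =>
    intro r p hch
    by_cases hc : c = p
    · subst hc
      cases r with
      | nil =>
        simp only [List.foldl_cons, pvPopWhile, pvRunCount, ne_eq,
          not_true_eq_false]
        simpa [pvRunCount] using ih [] c (by simp [pvNoAdj])
      | cons b r' =>
        obtain ⟨hb, hrest⟩ : c ≠ b ∧ pvNoAdj (b :: r') := hch
        have hstep : pvPopWhile c (c :: b :: r') = b :: r' := by
          simp [pvPopWhile, Ne.symm hb]
        simp only [List.foldl_cons]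
        rw [hstep, ih (b :: r') c ⟨hb, hrest⟩]
        simp [pvRunCount]
    · have hstep : pvPopWhile c (p :: r) = p :: r := by
        simp [pvPopWhile, Ne.symm hc]
      have hch' : pvNoAdj (c :: p :: r) := ⟨hc, hch⟩
      have := ih (p :: r) c hch'
      simp only [List.foldl_cons, hstep]
      rw [this]
      simp [pvRunCount, hc]

-- ===== VERDICT (by name: the statement is the Claim_ definition above) =====
theorem colorTheBall_spec : Claim_equal_colorTheBall := by
  intro balloons _
  unfold Spec_colorTheBall
  cases balloons with
  | nil => rfl
  | cons h t =>
    unfold colorTheBall colorTheBall_alt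
    simp only [List.foldl_cons]
    have h0 : pvPopWhile h ([] : List Int) = [] := rfl
    rw [if_neg (by simp)]
    simpa [h0] using pv_key t [] h (by simp [pvNoAdj])
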